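-- pv_equiv track=rewrite | github.com/RobinRietdijk/CSE3000Q2_SMT | rq3.py | _find_isolated
-- ===== SOURCE A (Python) =====
-- def _find_isolated(puzzle: list, n: int) -> int:
--     """ Finds the number of isolated duplicates in a puzzle
--
--     Args:
--         puzzle (list): Puzzle grid
--         n (int): Size of the puzzle
--
--     Returns:
--         int: The number of isolated duplicates
--     """
--     isolated = 0
--     for i in range(n):
--         row_map = {}
--         col_map = {}
--         k = 0
--         while k < n:
--             nk = k
--             if k < n-1 and puzzle[i][k] == puzzle[i][k+1]:
--                 if k < n-2 and puzzle[i][k] == puzzle[i][k+2]: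
--                     nk += 3
--                 else:
--                     nk += 2
--             else:
--                 nk += 1
--
--             v = puzzle[i][k]
--             row_map[v] = row_map.get(v, 0)+1
--             k = nk
--
--         k = 0
--         while k < n:
--             nk = k
--             if k < n-1 and puzzle[k][i] == puzzle[k+1][i]:
--                 if k < n-2 and puzzle[k][i] == puzzle[k+2][i]:
--                     nk += 3
--                 else:
--                     nk += 2
--             else:
--                 nk += 1
--
--             v = puzzle[k][i]
--             col_map[v] = col_map.get(v, 0)+1
--             k = nk
--
--         for _, val in row_map.items():
--             if val > 1:
--                 isolated += 1
--         for _, val in col_map.items():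
--             if val > 1:
--                 isolated += 1
--     return isolated
-- ===== SOURCE B (Python) =====
-- def _find_isolated(puzzle: list, n: int) -> int:
--     """ Finds the number of isolated duplicates in a puzzle (run-length rewrite). """
--     def line_score(line):
--         counts = {}
--         run = 0
--         for idx, v in enumerate(line):
--             run += 1
--             if idx + 1 == len(line) or line[idx + 1] != v:
--                 # a maximal run of length `run` contributes ceil(run/3) occurrences
--                 counts[v] = counts.get(v, 0) + (run + 2) // 3
--                 run = 0
--         return sum(1 for total in counts.values() if total > 1)
--
--     total = 0
--     for i in range(n):
--         total += line_score(puzzle[i][:n])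
--         total += line_score([puzzle[k][i] for k in range(n)])
--     return total
-- ===== Notes on version B (the rewrite author's own statement) =====
-- stated objective: simpler
-- what changed: Replaced A's stateful 1/2/3-stride index walk over each row/column with a single left-to-right pass that measures each maximal run of equal values and adds its closed-form chunk count (run+2)//3 to a per-value counter.
import Mathlib
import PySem

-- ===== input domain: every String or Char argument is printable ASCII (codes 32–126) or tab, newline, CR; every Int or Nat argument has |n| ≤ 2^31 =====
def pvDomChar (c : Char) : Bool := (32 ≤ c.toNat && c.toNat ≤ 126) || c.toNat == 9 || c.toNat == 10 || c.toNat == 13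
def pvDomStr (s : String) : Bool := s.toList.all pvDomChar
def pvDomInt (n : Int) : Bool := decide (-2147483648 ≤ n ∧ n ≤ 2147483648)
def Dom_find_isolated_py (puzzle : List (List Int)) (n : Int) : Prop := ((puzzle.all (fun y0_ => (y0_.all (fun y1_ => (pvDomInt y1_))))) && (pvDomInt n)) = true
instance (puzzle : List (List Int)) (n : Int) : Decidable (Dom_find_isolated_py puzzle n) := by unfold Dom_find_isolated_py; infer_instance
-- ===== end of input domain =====

-- B replaces A's stateful 1/2/3-stride index walk over each row/column by a single pass that
-- measures each maximal run and adds its closed-form chunk count (run+2)//3 (objective: simpler).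

-- ===== PORT A =====
-- puzzle[i][k]; the default is never used under Pre_ (A raises IndexError outside it)
def pvGetA (puzzle : List (List Int)) (i k : Int) : Int :=
  PySem.List.pyGetD (PySem.List.pyGetD puzzle i []) k 0

-- A's `while k < n` loop, shared by the row and column passes (`get` is puzzle[i][·] / puzzle[·][i])
def pvALoop (get : Int → Int) (n k : Int) (m : PySem.Dict Int Int) : PySem.Dict Int Int :=
  if _h : k < n then
    pvALoop get n
      (if k < n - 1 ∧ get k = get (k + 1) then
         if k < n - 2 ∧ get k = get (k + 2) then k + 3 else k + 2
       else k + 1)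
      (m.insert (get k) (m.getD (get k) 0 + 1))
  else m
termination_by (n - k).toNat
decreasing_by split_ifs <;> omega

-- `for _, val in map.items(): if val > 1: isolated += 1`
def pvCountDup (m : PySem.Dict Int Int) (acc : Int) : Int :=
  m.items.foldl (fun a p => if p.2 > 1 then a + 1 else a) acc

def find_isolated_py (puzzle : List (List Int)) (n : Int) : Int :=
  (PySem.List.pyRange 0 n 1).foldl
    (fun isolated i =>
      let row_map := pvALoop (fun k => pvGetA puzzle i k) n 0 PySem.Dict.empty
      let col_map := pvALoop (fun k => pvGetA puzzle k i) n 0 PySem.Dict.empty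
      pvCountDup col_map (pvCountDup row_map isolated))
    0

-- ===== PORT B =====
-- B's per-line loop: `run` counts the current run seen so far (a nonnegative counter, so Nat and
-- Nat division (run+1+2)/3 are exact for Python's (run+2)//3 after run += 1); flush at run ends
-- (the lookahead `line[idx+1] != v` / end-of-line is the shape of the remaining list).
def pvBLoop : List Int → Nat → PySem.Dict Int Int → PySem.Dict Int Int
  | [], _, counts => counts
  | [v], run, counts => counts.insert v (counts.getD v 0 + ((run + 3) / 3 : Nat))
  | v :: w :: rest, run, counts =>
    if w = v then pvBLoop (w :: rest) (run + 1) counts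
    else pvBLoop (w :: rest) 0 (counts.insert v (counts.getD v 0 + ((run + 3) / 3 : Nat)))

-- `sum(1 for total in counts.values() if total > 1)`
def pvLineScore (line : List Int) : Int :=
  (pvBLoop line 0 PySem.Dict.empty).values.foldl (fun a t => if t > 1 then a + 1 else a) 0

def find_isolated_py_alt (puzzle : List (List Int)) (n : Int) : Int :=
  (PySem.List.pyRange 0 n 1).foldl
    (fun total i =>
      total
        + pvLineScore (PySem.List.slice (PySem.List.pyGetD puzzle i []) none (some n))
        + pvLineScore ((PySem.List.pyRange 0 n 1).map
            (fun k => PySem.List.pyGetD (PySem.List.pyGetD puzzle k []) i 0)))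
    0

-- ===== PRECONDITION & SPEC =====
-- A raises IndexError when the puzzle has fewer than n rows or one of its first n rows is
-- shorter than n; Pre_ excludes exactly those inputs.
def Pre_find_isolated_py (puzzle : List (List Int)) (n : Int) : Prop :=
  n ≤ (puzzle.length : Int) ∧ ∀ row ∈ puzzle.take n.toNat, n ≤ (row.length : Int)
instance (puzzle : List (List Int)) (n : Int) : Decidable (Pre_find_isolated_py puzzle n) := by
  unfold Pre_find_isolated_py; infer_instance

def pvWitness_find_isolated_py : List (List Int) × Int := ([[1, 1, 2], [1, 2, 2], [3, 3, 3]], 3)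

def Spec_find_isolated_py (puzzle : List (List Int)) (n : Int) (out : Int) : Prop := out = find_isolated_py_alt puzzle n
instance (puzzle : List (List Int)) (n : Int) (out : Int) : Decidable (Spec_find_isolated_py puzzle n out) := by unfold Spec_find_isolated_py; infer_instance

-- ===== CLAIM (what is proved, stated in full; the proofs are below) =====
def Claim_equal_find_isolated_py : Prop := ∀ (puzzle : List (List Int)) (n : Int), Dom_find_isolated_py puzzle n → Pre_find_isolated_py puzzle n → Spec_find_isolated_py puzzle n (find_isolated_py puzzle n)

-- ===== LEMMAS AND PROOFS =====

-- absorbing three more elements of the current run into `run` is one extra chunk for its value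
theorem pvBLoop_shift (v : Int) (ys : List Int) : ∀ (L : Nat) (d : PySem.Dict Int Int),
    pvBLoop (v :: ys) (L + 3) d = pvBLoop (v :: ys) L (d.insert v (d.getD v 0 + 1)) := by
  induction ys with
  | nil =>
    intro L d
    have h3 : ((L + 3 + 3) / 3 : Nat) = ((L + 3) / 3 : Nat) + 1 := by omega
    rw [pvBLoop, pvBLoop, PySem.Dict.getD_insert_self, PySem.Dict.insert_insert_self, h3]
    congr 1
    push_cast
    ring
  | cons w ws ih =>
    intro L d
    by_cases hw : w = v
    · subst hw
      rw [pvBLoop, if_pos rfl, pvBLoop, if_pos rfl]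
      have h : L + 3 + 1 = (L + 1) + 3 := by omega
      rw [h, ih]
    · have h3 : ((L + 3 + 3) / 3 : Nat) = ((L + 3) / 3 : Nat) + 1 := by omega
      rw [pvBLoop, if_neg hw, pvBLoop, if_neg hw, PySem.Dict.getD_insert_self,
        PySem.Dict.insert_insert_self, h3]
      congr 2
      push_cast
      ring

-- A's 1/2/3-stride walk from index k builds the same counter as B's run pass on the suffix
theorem pvALoop_eq_pvBLoop (xs : List Int) (n : Int) (get : Int → Int)
    (hn : (xs.length : Int) = n)
    (hget : ∀ (j : Nat) (h : j < xs.length), get (j : Int) = xs[j]) :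
    ∀ (fuel : Nat) (k : Nat) (m : PySem.Dict Int Int), (n - (k : Int)).toNat ≤ fuel →
      pvALoop get n (k : Int) m = pvBLoop (xs.drop k) 0 m := by
  intro fuel
  induction fuel with
  | zero =>
    intro k m hfu
    have hk : ¬((k : Int) < n) := by omega
    rw [pvALoop, dif_neg hk, List.drop_eq_nil_of_le (by omega), pvBLoop]
  | succ fuel ih =>
    intro k m hfu
    by_cases hk : (k : Int) < n
    · have hklen : k < xs.length := by omega
      have hgk : get (k : Int) = xs[k] := hget k hklen
      have hdk : xs.drop k = xs[k] :: xs.drop (k + 1) := List.drop_eq_getElem_cons hklen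
      rw [pvALoop, dif_pos hk]
      by_cases c1 : (k : Int) < n - 1 ∧ get (k : Int) = get ((k : Int) + 1)
      · have hk1 : k + 1 < xs.length := by omega
        have e1 : get ((k : Int) + 1) = xs[k + 1] := by
          have h := hget (k + 1) hk1; push_cast at h; exact h
        have hvv : xs[k] = xs[k + 1] := by rw [← hgk, ← e1]; exact c1.2
        have hd2 : xs.drop (k + 1) = xs[k + 1] :: xs.drop (k + 2) :=
          List.drop_eq_getElem_cons hk1
        rw [if_pos c1]
        by_cases c2 : (k : Int) < n - 2 ∧ get (k : Int) = get ((k : Int) + 2)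
        · have hk2 : k + 2 < xs.length := by omega
          have e2 : get ((k : Int) + 2) = xs[k + 2] := by
            have h := hget (k + 2) hk2; push_cast at h; exact h
          have hvv2 : xs[k] = xs[k + 2] := by rw [← hgk, ← e2]; exact c2.2
          have hd3 : xs.drop (k + 2) = xs[k + 2] :: xs.drop (k + 3) :=
            List.drop_eq_getElem_cons hk2
          rw [if_pos c2, show (k : Int) + 3 = ((k + 3 : Nat) : Int) by push_cast; ring,
            ih (k + 3) _ (by omega), hgk, hdk, hd2, hd3, ← hvv, ← hvv2,
            pvBLoop, if_pos rfl, pvBLoop, if_pos rfl]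
          cases ht : xs.drop (k + 3) with
          | nil => rw [pvBLoop, pvBLoop]; norm_num
          | cons u t' =>
            by_cases hu : u = xs[k]
            · subst hu
              rw [pvBLoop, if_pos rfl]
              have h := pvBLoop_shift xs[k] t' 0 m
              norm_num at h
              rw [h]
            · rw [pvBLoop, if_neg hu]
              norm_num
        · rw [if_neg c2, show (k : Int) + 2 = ((k + 2 : Nat) : Int) by push_cast; ring,
            ih (k + 2) _ (by omega), hgk, hdk, hd2, ← hvv, pvBLoop, if_pos rfl]
          cases ht : xs.drop (k + 2) with
          | nil => rw [pvBLoop, pvBLoop]; norm_num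
          | cons u t' =>
            have hk2 : k + 2 < xs.length := by
              have := List.length_drop (l := xs) (i := k + 2)
              rw [ht] at this; simp at this; omega
            have hu : u = xs[k + 2] := by
              have := List.drop_eq_getElem_cons hk2 (l := xs)
              rw [ht] at this; exact (List.cons.injEq _ _ _ _).mp this |>.1
            have hne : xs[k] ≠ u := by
              rw [hu, ← hgk, ← (by have h := hget (k + 2) hk2; push_cast at h; exact h :
                get ((k : Int) + 2) = xs[k + 2])]
              intro heq
              exact c2 ⟨by omega, heq⟩
            rw [pvBLoop, if_neg (fun h => hne h.symm)]
            norm_num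
      · rw [if_neg c1, show (k : Int) + 1 = ((k + 1 : Nat) : Int) by push_cast; ring,
          ih (k + 1) _ (by omega), hgk, hdk]
        cases ht : xs.drop (k + 1) with
        | nil => rw [pvBLoop, pvBLoop]; norm_num
        | cons u t' =>
          have hk1 : k + 1 < xs.length := by
            have := List.length_drop (l := xs) (i := k + 1)
            rw [ht] at this; simp at this; omega
          have hu : u = xs[k + 1] := by
            have := List.drop_eq_getElem_cons hk1 (l := xs)
            rw [ht] at this; exact (List.cons.injEq _ _ _ _).mp this |>.1
          have hne : xs[k] ≠ u := by
            rw [hu, ← hgk, ← (by have h := hget (k + 1) hk1; push_cast at h; exact h :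
              get ((k : Int) + 1) = xs[k + 1])]
            intro heq
            exact c1 ⟨by omega, heq⟩
          rw [pvBLoop, if_neg (fun h => hne h.symm)]
          norm_num
    · rw [pvALoop, dif_neg hk, List.drop_eq_nil_of_le (by omega), pvBLoop]

-- A's items-loop is `acc +` the number of duplicated values
theorem pvCountDup_eq (m : PySem.Dict Int Int) (acc : Int) :
    pvCountDup m acc = acc + (m.items.countP fun p => decide (p.2 > 1)) := by
  unfold pvCountDup
  rw [PySem.List.foldl_ite_add_one]

-- B's values-loop counts the same items
theorem pvLineScore_eq (line : List Int) :
    pvLineScore line = ((pvBLoop line 0 PySem.Dict.empty).items.countP fun p => decide (p.2 > 1)) := by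
  unfold pvLineScore
  rw [show (pvBLoop line 0 PySem.Dict.empty).values
      = (pvBLoop line 0 PySem.Dict.empty).items.map (·.2) from rfl,
    PySem.List.foldl_ite_add_one, List.countP_map, zero_add]
  congr 1

-- the row pass: A's stride loop over puzzle[i][·] equals B's pass over puzzle[i][:n]
theorem pvRow_eq (puzzle : List (List Int)) (n i : Int) (h0 : 0 ≤ i) (hi : i < n)
    (hlen : n ≤ (puzzle.length : Int))
    (hrows : ∀ row ∈ puzzle.take n.toNat, n ≤ (row.length : Int)) :
    pvALoop (fun k => pvGetA puzzle i k) n 0 PySem.Dict.empty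
      = pvBLoop (PySem.List.slice (PySem.List.pyGetD puzzle i []) none (some n)) 0
          PySem.Dict.empty := by
  have hil : i.toNat < puzzle.length := by omega
  have hR : PySem.List.pyGetD puzzle i [] = puzzle[i.toNat] :=
    PySem.List.pyGetD_eq_getElem puzzle [] h0 (by omega)
  have hmem : puzzle[i.toNat] ∈ puzzle.take n.toNat := by
    have h : (puzzle.take n.toNat)[i.toNat]'(by simp; omega) = puzzle[i.toNat] :=
      List.getElem_take
    rw [← h]; exact List.getElem_mem _
  have hRlen : n ≤ (puzzle[i.toNat].length : Int) := hrows _ hmem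
  have hs : PySem.List.slice (PySem.List.pyGetD puzzle i []) none (some n)
      = puzzle[i.toNat].take n.toNat := by
    rw [hR, PySem.List.slice_to _ (by omega)]
  have hxlen : ((puzzle[i.toNat].take n.toNat).length : Int) = n := by
    simp [List.length_take]; omega
  rw [hs]
  have hget : ∀ (j : Nat) (h : j < (puzzle[i.toNat].take n.toNat).length),
      pvGetA puzzle i (j : Int) = (puzzle[i.toNat].take n.toNat)[j] := by
    intro j hj
    have hjR : j < puzzle[i.toNat].length := by
      simp [List.length_take] at hj; omega
    unfold pvGetA
    rw [hR, PySem.List.pyGetD_eq_getElem _ 0 (by omega) (by omega)]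
    simp [List.getElem_take]
  have h := pvALoop_eq_pvBLoop _ n (fun k => pvGetA puzzle i k) hxlen hget n.toNat 0 PySem.Dict.empty (by omega)
  rw [List.drop_zero] at h
  exact_mod_cast h

-- the column pass: A's stride loop over puzzle[·][i] equals B's pass over the built column
theorem pvCol_eq (puzzle : List (List Int)) (n i : Int) (h0 : 0 ≤ i) (hi : i < n) :
    pvALoop (fun k => pvGetA puzzle k i) n 0 PySem.Dict.empty
      = pvBLoop ((PySem.List.pyRange 0 n 1).map
          (fun k => PySem.List.pyGetD (PySem.List.pyGetD puzzle k []) i 0)) 0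
          PySem.Dict.empty := by
  have hxlen : ((((PySem.List.pyRange 0 n 1).map
      (fun k => PySem.List.pyGetD (PySem.List.pyGetD puzzle k []) i 0)).length : Int)) = n := by
    simp [PySem.List.length_pyRange_one]; omega
  have hget : ∀ (j : Nat) (h : j < ((PySem.List.pyRange 0 n 1).map
      (fun k => PySem.List.pyGetD (PySem.List.pyGetD puzzle k []) i 0)).length),
      pvGetA puzzle (j : Int) i = ((PySem.List.pyRange 0 n 1).map
        (fun k => PySem.List.pyGetD (PySem.List.pyGetD puzzle k []) i 0))[j] := by
    intro j hj
    rw [List.getElem_map, PySem.List.getElem_pyRange_one, zero_add]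
    rfl
  have h := pvALoop_eq_pvBLoop _ n (fun k => pvGetA puzzle k i) hxlen hget n.toNat 0 PySem.Dict.empty (by omega)
  rw [List.drop_zero] at h
  exact_mod_cast h

-- ===== VERDICT (by name: the statement is the Claim_ definition above) =====
theorem find_isolated_py_spec : Claim_equal_find_isolated_py := by
  intro puzzle n _dom hpre
  unfold Spec_find_isolated_py find_isolated_py find_isolated_py_alt
  apply PySem.List.foldl_congr_mem
  intro acc i hi
  rw [PySem.List.mem_pyRange_one] at hi
  rw [pvRow_eq puzzle n i hi.1 hi.2 hpre.1 hpre.2, pvCol_eq puzzle n i hi.1 hi.2,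
    pvCountDup_eq, pvCountDup_eq, pvLineScore_eq, pvLineScore_eq]
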